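-- pv_equiv track=rewrite | github.com/lifu963/xlf-ycy | treehole/utils.py | clearSayings
-- ===== SOURCE A (Python) =====
-- def CountChar(m_str,igs):
--     count=0
--     for ig in igs:
--         count+=m_str.count(ig)
--     return len(m_str)-count
--
-- def clearSayings(sayings):
--     sayings_end=[]
--     for saying_o in sayings.split('.'):
--         if CountChar(saying_o,igs=(' ',','))<=12:
--             sayings_end.append(saying_o)
--         else:
--             # '我是猪,我是猪,我是猪,我是猪,我是猪'
--             for saying_t in saying_o.split(','):
--                 if CountChar(saying_t,' ')<=12:
--                     sayings_end.append(saying_t)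
--                 else:
--                     for saying_th in saying_t.split(' '):
--                         if len(saying_th)<=12:
--                             sayings_end.append(saying_th)
--     for saying_end in sayings_end:
--         if saying_end=='':
--             sayings_end.remove(saying_end)
--     return sayings_end
-- ===== SOURCE B (Python) =====
-- def clearSayings(sayings):
--     delims = ['.', ',', ' ']
--     out = []
--     def process(piece, i):
--         eff = len(piece) - sum(piece.count(d) for d in delims[i+1:])
--         if eff <= 12:
--             out.append(piece)
--         elif i + 1 < len(delims):
--             for sub in piece.split(delims[i+1]):
--                 process(sub, i + 1)
--     for p in sayings.split(delims[0]):
--         process(p, 0)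
--     for x in out:
--         if x == '':
--             out.remove(x)
--     return out
-- ===== Notes on version B (the rewrite author's own statement) =====
-- stated objective: simpler
-- what changed: Replaces the three hard-coded nested split/CountChar loop levels with one recursive helper driven by a delimiter list ['.', ',', ' '], computing the effective length from the remaining delimiters; the final empty-removal loop is kept with Python's mutate-while-iterating semantics.
import Mathlib
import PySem

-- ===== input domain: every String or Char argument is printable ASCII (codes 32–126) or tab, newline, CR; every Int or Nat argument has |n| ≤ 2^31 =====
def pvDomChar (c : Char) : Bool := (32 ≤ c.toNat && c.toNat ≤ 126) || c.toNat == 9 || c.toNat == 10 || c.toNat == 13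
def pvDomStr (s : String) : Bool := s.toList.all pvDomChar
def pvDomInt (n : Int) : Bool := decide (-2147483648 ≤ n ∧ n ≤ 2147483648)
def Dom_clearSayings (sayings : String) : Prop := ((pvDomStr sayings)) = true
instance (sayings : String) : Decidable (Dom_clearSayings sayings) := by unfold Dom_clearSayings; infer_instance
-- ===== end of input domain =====

-- B restructures the three hard-coded nested split levels of A into one recursive helper
-- over a delimiter list; the trailing empty-removal loop (mutation during iteration, which
-- skips the element after each removal) is ported exactly in both.

-- ===== PORT A =====
-- Python's `for saying_end in sayings_end: if saying_end == '': sayings_end.remove(saying_end)`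
-- ported with Python's iterator semantics: index advances after each body run; `lst.remove(x)`
-- with x an element of lst never raises and erases the first occurrence (= List.erase).
def pvRemoveLoop (lst : List String) (i : Nat) : List String :=
  if h : i < lst.length then
    if lst[i] = "" then pvRemoveLoop (lst.erase "") (i + 1)
    else pvRemoveLoop lst (i + 1)
  else lst
termination_by lst.length - i
decreasing_by
  · have hm : "" ∈ lst := by
      have := lst.getElem_mem h
      rwa [‹lst[i] = ""›] at this
    rw [List.length_erase_of_mem hm]; omega
  · omega

def pvCountChar (m_str : String) (igs : List String) : Int :=
  (PySem.Str.len m_str : Int) -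
    igs.foldl (fun c ig => c + (PySem.Str.count m_str ig : Int)) 0

def clearSayings (sayings : String) : List String :=
  let sayings_end :=
    ((PySem.Str.split? sayings ".").getD []).foldl (fun acc saying_o =>
      if pvCountChar saying_o [" ", ","] ≤ 12 then acc ++ [saying_o]
      else ((PySem.Str.split? saying_o ",").getD []).foldl (fun acc2 saying_t =>
        if pvCountChar saying_t [" "] ≤ 12 then acc2 ++ [saying_t]
        else ((PySem.Str.split? saying_t " ").getD []).foldl (fun acc3 saying_th =>
          if PySem.Str.len saying_th ≤ 12 then acc3 ++ [saying_th] else acc3) acc2) acc) []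
  pvRemoveLoop sayings_end 0

-- ===== PORT B =====
-- effective length of `piece` under the remaining delimiters `rest` (= delims[i+1:])
def pvEff (piece : String) (rest : List String) : Int :=
  (PySem.Str.len piece : Int) - (rest.map (fun d => (PySem.Str.count piece d : Int))).sum

def pvProcess (out : List String) (piece : String) (rest : List String) : List String :=
  if pvEff piece rest ≤ 12 then out ++ [piece]
  else
    match rest with
    | [] => out
    | d :: rest' =>
      ((PySem.Str.split? piece d).getD []).foldl (fun acc sub => pvProcess acc sub rest') out
termination_by rest.length
decreasing_by simp

def clearSayings_alt (sayings : String) : List String :=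
  pvRemoveLoop
    (((PySem.Str.split? sayings ".").getD []).foldl
      (fun acc p => pvProcess acc p [",", " "]) []) 0

-- ===== PRECONDITION & SPEC =====
def Spec_clearSayings (sayings : String) (out : List String) : Prop := out = clearSayings_alt sayings
instance (sayings : String) (out : List String) : Decidable (Spec_clearSayings sayings out) := by unfold Spec_clearSayings; infer_instance

-- ===== CLAIM (what is proved, stated in full; the proofs are below) =====
def Claim_equal_clearSayings : Prop := ∀ (sayings : String), Dom_clearSayings sayings → Spec_clearSayings sayings (clearSayings sayings)

-- ===== LEMMAS AND PROOFS =====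

lemma pvProcess_nil (a : List String) (th : String) :
    pvProcess a th [] = if PySem.Str.len th ≤ 12 then a ++ [th] else a := by
  unfold pvProcess
  simp [pvEff]

lemma pvProcess_one (a : List String) (t : String) :
    pvProcess a t [" "] =
      if pvCountChar t [" "] ≤ 12 then a ++ [t]
      else ((PySem.Str.split? t " ").getD []).foldl (fun acc3 th =>
        if PySem.Str.len th ≤ 12 then acc3 ++ [th] else acc3) a := by
  unfold pvProcess
  have hc : pvEff t [" "] = pvCountChar t [" "] := by
    simp [pvEff, pvCountChar]
  rw [hc]
  split_ifs with h
  · rfl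
  · have hf : (fun (acc : List String) (sub : String) => pvProcess acc sub ([] : List String))
        = (fun (acc3 : List String) (th : String) =>
            if PySem.Str.len th ≤ 12 then acc3 ++ [th] else acc3) :=
      funext fun a => funext fun th => pvProcess_nil a th
    show List.foldl (fun acc sub => pvProcess acc sub ([] : List String)) a
        ((PySem.Str.split? t " ").getD []) = _
    rw [hf]

lemma pvProcess_two (a : List String) (p : String) :
    pvProcess a p [",", " "] =
      if pvCountChar p [" ", ","] ≤ 12 then a ++ [p]
      else ((PySem.Str.split? p ",").getD []).foldl (fun acc2 t =>
        if pvCountChar t [" "] ≤ 12 then acc2 ++ [t]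
        else ((PySem.Str.split? t " ").getD []).foldl (fun acc3 th =>
          if PySem.Str.len th ≤ 12 then acc3 ++ [th] else acc3) acc2) a := by
  unfold pvProcess
  have hc : pvEff p [",", " "] = pvCountChar p [" ", ","] := by
    simp [pvEff, pvCountChar]; ring
  rw [hc]
  split_ifs with h
  · rfl
  · have hf : (fun (acc : List String) (sub : String) => pvProcess acc sub [" "])
        = (fun (acc2 : List String) (t : String) =>
            if pvCountChar t [" "] ≤ 12 then acc2 ++ [t]
            else ((PySem.Str.split? t " ").getD []).foldl (fun acc3 th =>
              if PySem.Str.len th ≤ 12 then acc3 ++ [th] else acc3) acc2) :=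
      funext fun a => funext fun t => pvProcess_one a t
    show List.foldl (fun acc sub => pvProcess acc sub [" "]) a
        ((PySem.Str.split? p ",").getD []) = _
    rw [hf]

-- ===== VERDICT (by name: the statement is the Claim_ definition above) =====
theorem clearSayings_spec : Claim_equal_clearSayings := by
  intro s _
  unfold Spec_clearSayings clearSayings clearSayings_alt
  have hf : (fun (acc : List String) (saying_o : String) =>
      if pvCountChar saying_o [" ", ","] ≤ 12 then acc ++ [saying_o]
      else ((PySem.Str.split? saying_o ",").getD []).foldl (fun acc2 saying_t =>
        if pvCountChar saying_t [" "] ≤ 12 then acc2 ++ [saying_t]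
        else ((PySem.Str.split? saying_t " ").getD []).foldl (fun acc3 saying_th =>
          if PySem.Str.len saying_th ≤ 12 then acc3 ++ [saying_th] else acc3) acc2) acc)
      = (fun (acc : List String) (p : String) => pvProcess acc p [",", " "]) := by
    funext a p
    exact (pvProcess_two a p).symm
  rw [hf]
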